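-- pv_equiv track=rewrite | github.com/Cristian0624/Minimal-cost-for-building-roads | alg_Tarjan-Klein-Karger.py | _lca_max_weight
-- ===== SOURCE A (Python) =====
-- def _lca_max_weight(adj, all_ids):
--     """
--     For every node compute depth, parent, and the weight of the edge to its
--     parent using a simple iterative DFS from each unvisited node.
--     Returns (depth, par, par_weight).
--     """
--     depth      = {}
--     par        = {}
--     par_weight = {}
--
--     for root in all_ids:
--         if root in depth:
--             continue
--         stack = [(root, -1, 0, 0)]
--         while stack:
--             node, parent_node, d, pw = stack.pop()
--             if node in depth:
--                 continue
--             depth[node]      = d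
--             par[node]        = parent_node
--             par_weight[node] = pw
--             for (nb, w) in adj.get(node, []):
--                 if nb not in depth:
--                     stack.append((nb, node, d + 1, w))
--
--     return depth, par, par_weight
-- ===== SOURCE B (Python) =====
-- def _lca_max_weight(adj, all_ids):
--     """
--     Recursive-DFS re-implementation: one helper dfs(node, parent, d, pw) that
--     records the node and recurses over its adjacency list in reverse, which
--     reproduces the iterative stack's LIFO visitation order exactly.
--     """
--     depth      = {}
--     par        = {}
--     par_weight = {}
--
--     def dfs(node, parent_node, d, pw):
--         if node in depth:
--             return
--         depth[node]      = d
--         par[node]        = parent_node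
--         par_weight[node] = pw
--         for (nb, w) in reversed(adj.get(node, [])):
--             if nb not in depth:
--                 dfs(nb, node, d + 1, w)
--
--     for root in all_ids:
--         dfs(root, -1, 0, 0)
--
--     return depth, par, par_weight
-- ===== Notes on version B (the rewrite author's own statement) =====
-- stated objective: alternative
-- what changed: The explicit-stack while-loop DFS is replaced by a recursive helper dfs(node, parent, d, pw) that records the node and recurses over its adjacency list in reverse, reproducing the stack's LIFO visitation order without maintaining a stack of 4-tuples.
import Mathlib
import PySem

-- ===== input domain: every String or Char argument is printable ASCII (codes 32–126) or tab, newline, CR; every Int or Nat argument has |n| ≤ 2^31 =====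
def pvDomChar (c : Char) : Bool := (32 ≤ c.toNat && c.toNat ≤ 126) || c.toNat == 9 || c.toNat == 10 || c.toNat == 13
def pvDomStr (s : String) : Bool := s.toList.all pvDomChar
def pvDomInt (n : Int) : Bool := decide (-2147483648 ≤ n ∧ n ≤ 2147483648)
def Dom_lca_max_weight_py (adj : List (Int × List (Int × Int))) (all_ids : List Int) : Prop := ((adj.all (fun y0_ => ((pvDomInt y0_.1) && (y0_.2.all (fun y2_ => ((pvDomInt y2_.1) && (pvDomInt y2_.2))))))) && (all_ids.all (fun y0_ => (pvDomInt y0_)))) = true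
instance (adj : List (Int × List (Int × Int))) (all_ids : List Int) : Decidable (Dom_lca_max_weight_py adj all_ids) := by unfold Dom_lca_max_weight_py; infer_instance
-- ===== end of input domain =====

-- B replaces A's explicit-stack DFS by a recursive dfs helper that walks each
-- adjacency list in reverse, reproducing the stack's LIFO visitation order;
-- objective: alternative decomposition (same asymptotic cost).

-- ===== PORT A =====

-- shared helper: Python's `adj.get(node, [])` on the association list (first match)
def adjGet (adj : List (Int × List (Int × Int))) (n : Int) : List (Int × Int) :=
  (List.lookup n adj).getD []

-- state: the three dicts (depth, par, par_weight)
def St : Type := PySem.Dict Int Int × PySem.Dict Int Int × PySem.Dict Int Int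

-- termination potential for A's while-loop: total adjacency length of unvisited keys
def phi (adj : List (Int × List (Int × Int))) (dep : PySem.Dict Int Int) : Nat :=
  ((adj.filter (fun p => !(dep.contains p.1))).map (fun p => p.2.length)).sum

lemma phi_insert_le (adj : List (Int × List (Int × Int))) (dep : PySem.Dict Int Int)
    (n : Int) (v : Int) : phi adj (dep.insert n v) ≤ phi adj dep := by
  induction adj with
  | nil => simp [phi]
  | cons hd tl ih =>
    simp only [phi, List.filter_cons] at ih ⊢
    rw [PySem.Dict.contains_insert]
    by_cases h : hd.1 = n
    · subst h
      simp only [BEq.rfl, Bool.true_or, Bool.not_true]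
      by_cases h2 : dep.contains hd.1
      · rw [if_neg (by decide), if_neg (by simp [h2])]
        exact ih
      · rw [if_neg (by decide), if_pos (by simp [h2])]
        simp only [List.map_cons, List.sum_cons]
        omega
    · have hkn : (hd.1 == n) = false := by simp [h]
      rw [hkn]
      simp only [Bool.false_or]
      by_cases h2 : dep.contains hd.1
      · rw [if_neg (by simp [h2]), if_neg (by simp [h2])]
        exact ih
      · rw [if_pos (by simp [h2]), if_pos (by simp [h2])]
        simp only [List.map_cons, List.sum_cons]
        omega

lemma phi_insert_strict (adj : List (Int × List (Int × Int))) (dep : PySem.Dict Int Int)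
    (n : Int) (v : Int) (hn : dep.contains n = false) :
    phi adj (dep.insert n v) + (adjGet adj n).length ≤ phi adj dep := by
  induction adj with
  | nil => simp [phi, adjGet]
  | cons hd tl ih =>
    obtain ⟨k, l⟩ := hd
    simp only [phi, List.filter_cons] at ih ⊢
    rw [PySem.Dict.contains_insert]
    by_cases h : k = n
    · subst h
      have hlk : adjGet ((k, l) :: tl) k = l := by
        simp [adjGet, List.lookup]
      rw [hlk]
      simp only [BEq.rfl, Bool.true_or, Bool.not_true]
      rw [if_neg (by decide), if_pos (by simp [hn])]
      simp only [List.map_cons, List.sum_cons]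
      have := phi_insert_le tl dep k v
      simp only [phi] at this
      omega
    · have hnk : (n == k) = false := by simp [Ne.symm h]
      have hlk : adjGet ((k, l) :: tl) n = adjGet tl n := by
        simp [adjGet, List.lookup, hnk]
      have hkn : (k == n) = false := by simp [h]
      rw [hlk, hkn]
      simp only [Bool.false_or]
      by_cases h2 : dep.contains k
      · rw [if_neg (by simp [h2]), if_neg (by simp [h2])]
        exact ih
      · rw [if_pos (by simp [h2]), if_pos (by simp [h2])]
        simp only [List.map_cons, List.sum_cons]
        omega

-- total adjacency length (upper bound of phi; also B's fuel bound)
def totalLen (adj : List (Int × List (Int × Int))) : Nat :=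
  (adj.map (fun p => p.2.length)).sum

-- A: the iterative stack DFS (stack top = list head; pushing the filtered
-- neighbour list appends its reverse in front, exactly Python's list push/pop)
def loopA (adj : List (Int × List (Int × Int))) (st : St)
    (stack : List (Int × Int × Int × Int)) : St :=
  match stack with
  | [] => st
  | (node, parent, d, pw) :: rest =>
    if h : st.1.contains node then loopA adj st rest
    else
      let st' : St := (st.1.insert node d, st.2.1.insert node parent, st.2.2.insert node pw)
      let pushes := ((adjGet adj node).filter (fun q => !(st'.1.contains q.1))).map
        (fun q => (q.1, node, d + 1, q.2))
      loopA adj st' (pushes.reverse ++ rest)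
termination_by (phi adj st.1, stack.length)
decreasing_by
  · exact Prod.Lex.right _ (by simp)
  · rcases Nat.lt_or_ge (phi adj (st.1.insert node d)) (phi adj st.1) with hlt | hge
    · exact Prod.Lex.left _ _ hlt
    · have hle := phi_insert_strict adj st.1 node d (by simpa using h)
      have hz : (adjGet adj node).length = 0 := by omega
      have heq : phi adj (st.1.insert node d) = phi adj st.1 := by
        have := phi_insert_le adj st.1 node d; omega
      rw [heq]
      apply Prod.Lex.right
      have : adjGet adj node = [] := List.length_eq_zero_iff.mp hz
      simp [this]

def lca_max_weight_py (adj : List (Int × List (Int × Int))) (all_ids : List Int) :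
    (List (Int × Int)) × (List (Int × Int)) × (List (Int × Int)) :=
  let st : St := all_ids.foldl
    (fun st root => if st.1.contains root then st else loopA adj st [(root, -1, 0, 0)])
    (PySem.Dict.empty, PySem.Dict.empty, PySem.Dict.empty)
  (st.1.items, st.2.1.items, st.2.2.items)

-- ===== PORT B =====

-- B's recursive dfs; `fuel` is only a totality guard: the recursion depth is
-- bounded by phi + 1 ≤ totalLen + 1 (see dfsB_irrel below), so with the fuel
-- the ports pass it is never exhausted.
def dfsB (adj : List (Int × List (Int × Int))) (fuel : Nat) (st : St)
    (node parent d pw : Int) : St :=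
  match fuel with
  | 0 => st
  | f + 1 =>
    if st.1.contains node then st
    else
      let st' : St := (st.1.insert node d, st.2.1.insert node parent, st.2.2.insert node pw)
      ((adjGet adj node).reverse).foldl
        (fun s q => if !(s.1.contains q.1) then dfsB adj f s q.1 node (d + 1) q.2 else s) st'

def lca_max_weight_py_alt (adj : List (Int × List (Int × Int))) (all_ids : List Int) :
    (List (Int × Int)) × (List (Int × Int)) × (List (Int × Int)) :=
  let st : St := all_ids.foldl
    (fun st root => dfsB adj (totalLen adj + 1) st root (-1) 0 0)
    (PySem.Dict.empty, PySem.Dict.empty, PySem.Dict.empty)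
  (st.1.items, st.2.1.items, st.2.2.items)

-- ===== PRECONDITION & SPEC =====
def Spec_lca_max_weight_py (adj : List (Int × List (Int × Int))) (all_ids : List Int) (out : (List (Int × Int)) × (List (Int × Int)) × (List (Int × Int))) : Prop := out = lca_max_weight_py_alt adj all_ids
instance (adj : List (Int × List (Int × Int))) (all_ids : List Int) (out : (List (Int × Int)) × (List (Int × Int)) × (List (Int × Int))) : Decidable (Spec_lca_max_weight_py adj all_ids out) := by unfold Spec_lca_max_weight_py; infer_instance

-- ===== CLAIM (what is proved, stated in full; the proofs are below) =====
def Claim_equal_lca_max_weight_py : Prop := ∀ (adj : List (Int × List (Int × Int))) (all_ids : List Int), Dom_lca_max_weight_py adj all_ids → Spec_lca_max_weight_py adj all_ids (lca_max_weight_py adj all_ids)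

-- ===== LEMMAS AND PROOFS =====

lemma phi_le_total (adj : List (Int × List (Int × Int))) (dep : PySem.Dict Int Int) :
    phi adj dep ≤ totalLen adj := by
  induction adj with
  | nil => simp [phi, totalLen]
  | cons hd tl ih =>
    simp only [phi, totalLen, List.filter_cons, List.map_cons, List.sum_cons] at ih ⊢
    by_cases h : dep.contains hd.1
    · rw [if_neg (by simp [h])]
      omega
    · rw [if_pos (by simp [h])]
      simp only [List.map_cons, List.sum_cons]
      omega

-- fold invariants and congruence under an invariant (specific to the St folds here)
lemma foldl_inv {β : Type} (inv : St → Prop) (f : St → β → St) :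
    ∀ (L : List β) (s : St), inv s → (∀ s b, inv s → inv (f s b)) → inv (L.foldl f s) := by
  intro L
  induction L with
  | nil => intro s hs _; exact hs
  | cons b L ih => intro s hs hp; exact ih (f s b) (hp s b hs) hp

lemma foldl_congr_inv {β : Type} (inv : St → Prop) (f g : St → β → St) :
    ∀ (L : List β) (s : St), inv s → (∀ s b, inv s → inv (f s b)) →
      (∀ s b, inv s → f s b = g s b) → L.foldl f s = L.foldl g s := by
  intro L
  induction L with
  | nil => intro s _ _ _; rfl
  | cons b L ih =>
    intro s hs hp hc
    simp only [List.foldl_cons]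
    rw [← hc s b hs]
    exact ih (f s b) (hp s b hs) hp hc

lemma foldl_filter_skip {β : Type} (inv : St → Prop) (p : β → Bool) (f : St → β → St) :
    ∀ (L : List β) (s : St), inv s → (∀ s b, inv s → inv (f s b)) →
      (∀ s b, inv s → p b = false → f s b = s) →
      L.foldl f s = (L.filter p).foldl f s := by
  intro L
  induction L with
  | nil => intro s _ _ _; rfl
  | cons b L ih =>
    intro s hs hp hskip
    by_cases hb : p b
    · simp only [List.foldl_cons, List.filter_cons, hb, if_pos]
      exact ih (f s b) (hp s b hs) hp hskip
    · have hb' : p b = false := by simpa using hb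
      simp only [List.foldl_cons, List.filter_cons, hb']
      rw [hskip s b hs hb']
      exact ih s hs hp hskip

-- monotonicity: dfsB only adds keys to the depth dict
lemma dfsB_mono (adj : List (Int × List (Int × Int))) :
    ∀ (f : Nat) (st : St) (node parent d pw k : Int), st.1.contains k = true →
      (dfsB adj f st node parent d pw).1.contains k = true := by
  intro f
  induction f with
  | zero => intro st node parent d pw k hk; simpa [dfsB] using hk
  | succ f ih =>
    intro st node parent d pw k hk
    simp only [dfsB]
    by_cases h : st.1.contains node
    · simpa [h] using hk
    · simp only [h, if_neg, Bool.false_eq_true, not_false_eq_true]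
      apply foldl_inv (fun s => s.1.contains k = true)
      · rw [PySem.Dict.contains_insert]; simp [hk]
      · intro s q hs
        by_cases hc : s.1.contains q.1
        · simpa [hc] using hs
        · simp only [hc, Bool.not_false, if_pos]
          exact ih s q.1 node (d + 1) q.2 k hs

lemma phi_mono_of_contains (adj : List (Int × List (Int × Int)))
    (dep dep' : PySem.Dict Int Int)
    (h : ∀ k, dep.contains k = true → dep'.contains k = true) :
    phi adj dep' ≤ phi adj dep := by
  induction adj with
  | nil => simp [phi]
  | cons hd tl ih =>
    simp only [phi, List.filter_cons] at ih ⊢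
    by_cases h2 : dep'.contains hd.1
    · rw [if_neg (by simp [h2])]
      by_cases h3 : dep.contains hd.1
      · rw [if_neg (by simp [h3])]; exact ih
      · rw [if_pos (by simp [h3])]
        simp only [List.map_cons, List.sum_cons]
        omega
    · have h3 : dep.contains hd.1 = false := by
        by_contra hc
        exact h2 (h hd.1 (by simpa using hc))
      rw [if_pos (by simp [h2]), if_pos (by simp [h3])]
      simp only [List.map_cons, List.sum_cons]
      omega

-- state after dfsB contains everything the start state contained
lemma dfsB_phi_le (adj : List (Int × List (Int × Int))) (f : Nat) (st : St)
    (node parent d pw : Int) :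
    phi adj (dfsB adj f st node parent d pw).1 ≤ phi adj st.1 :=
  phi_mono_of_contains adj st.1 _ (fun k hk => dfsB_mono adj f st node parent d pw k hk)

-- fuel irrelevance: any fuel strictly above phi gives the same result
lemma dfsB_irrel (adj : List (Int × List (Int × Int))) :
    ∀ (k : Nat) (f g : Nat) (st : St) (node parent d pw : Int),
      phi adj st.1 ≤ k → phi adj st.1 < f → phi adj st.1 < g →
      dfsB adj f st node parent d pw = dfsB adj g st node parent d pw := by
  intro k
  induction k using Nat.strong_induction_on with
  | _ k ih =>
    intro f g st node parent d pw hk hf hg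
    obtain ⟨f', rfl⟩ : ∃ f', f = f' + 1 := ⟨f - 1, by omega⟩
    obtain ⟨g', rfl⟩ : ∃ g', g = g' + 1 := ⟨g - 1, by omega⟩
    simp only [dfsB]
    by_cases h : st.1.contains node
    · simp [h]
    · rw [if_neg h, if_neg h]
      by_cases hadj : adjGet adj node = []
      · simp [hadj]
      · have hlen : 1 ≤ (adjGet adj node).length := List.length_pos_iff.mpr hadj
        have hstrict := phi_insert_strict adj st.1 node d (by simpa using h)
        set st' : St := (st.1.insert node d, st.2.1.insert node parent, st.2.2.insert node pw)
          with hst'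
        have hphi' : phi adj st'.1 < phi adj st.1 := by
          simp only [hst']; omega
        apply foldl_congr_inv (fun s => phi adj s.1 ≤ phi adj st'.1)
        · exact le_refl _
        · intro s q hs
          by_cases hc : s.1.contains q.1
          · simpa [hc] using hs
          · simp only [hc, Bool.not_false, if_pos]
            exact le_trans (dfsB_phi_le adj f' s q.1 node (d + 1) q.2) hs
        · intro s q hs
          by_cases hc : s.1.contains q.1
          · simp [hc]
          · simp only [hc, Bool.not_false, if_pos]
            exact ih (phi adj st'.1) (by omega) f' g' s q.1 node (d + 1) q.2
              hs (by omega) (by omega)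

-- the crux: A's stack loop is the fold of B's dfs over the stack entries
lemma loopA_eq_fold (adj : List (Int × List (Int × Int))) :
    ∀ (st : St) (stack : List (Int × Int × Int × Int)),
      loopA adj st stack = stack.foldl
        (fun s e => dfsB adj (totalLen adj + 1) s e.1 e.2.1 e.2.2.1 e.2.2.2) st := by
  intro st stack
  induction st, stack using loopA.induct adj with
  | case1 st => simp [loopA]
  | case2 st node parent d pw rest h ih =>
    rw [loopA]
    simp only [h, List.foldl_cons]
    rw [ih]
    have hB : dfsB adj (totalLen adj + 1) st node parent d pw = st := by
      simp only [dfsB]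
      rw [if_pos h]
    rw [hB]
    simp
  | case3 st node parent d pw rest h st' pushes ih =>
    have hB : dfsB adj (totalLen adj + 1) st node parent d pw =
        ((adjGet adj node).reverse).foldl
          (fun s q => if !(s.1.contains q.1) then dfsB adj (totalLen adj) s q.1 node (d + 1) q.2
            else s) st' := by
      simp only [dfsB]
      rw [if_neg h]
    have hpush : pushes.reverse = (((adjGet adj node).reverse.filter
        (fun q => !(st'.1.contains q.1))).map (fun q => (q.1, node, d + 1, q.2))) := by
      simp only [pushes]
      rw [← List.map_reverse, ← List.filter_reverse]
    have key : pushes.reverse.foldl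
        (fun s e => dfsB adj (totalLen adj + 1) s e.1 e.2.1 e.2.2.1 e.2.2.2) st' =
        dfsB adj (totalLen adj + 1) st node parent d pw := by
      rw [hB, hpush, List.foldl_map]
      by_cases hadj : adjGet adj node = []
      · simp [hadj]
      · have hlen : 1 ≤ (adjGet adj node).length := List.length_pos_iff.mpr hadj
        have hstrict := phi_insert_strict adj st.1 node d (by simpa using h)
        have hphi' : phi adj st'.1 < phi adj st.1 := by
          simp only [st']; omega
        have htot : phi adj st.1 ≤ totalLen adj := phi_le_total adj st.1
        rw [← foldl_filter_skip (fun s => ∀ k, st'.1.contains k = true → s.1.contains k = true)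
          (fun q => !(st'.1.contains q.1))
          (fun s q => dfsB adj (totalLen adj + 1) s q.1 node (d + 1) q.2)
          ((adjGet adj node).reverse) st' (fun k hk => hk)
          (fun s q hs k hk => dfsB_mono adj _ s q.1 node (d + 1) q.2 k (hs k hk))
          (fun s q hs hq => by
            have hc : s.1.contains q.1 = true := hs q.1 (by simpa using hq)
            simp [dfsB, hc])]
        apply foldl_congr_inv (fun s => ∀ k, st'.1.contains k = true → s.1.contains k = true)
        · exact fun k hk => hk
        · exact fun s q hs k hk => dfsB_mono adj _ s q.1 node (d + 1) q.2 k (hs k hk)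
        · intro s q hs
          by_cases hc : s.1.contains q.1
          · simp [dfsB, hc]
          · have hps : phi adj s.1 ≤ phi adj st'.1 := phi_mono_of_contains adj st'.1 s.1 hs
            rw [dfsB_irrel adj (phi adj s.1) (totalLen adj + 1) (totalLen adj)
              s q.1 node (d + 1) q.2 (le_refl _) (by omega) (by omega)]
            simp [hc]
    rw [loopA]
    simp only [h, List.foldl_cons]
    rw [ih, List.foldl_append, key]
    simp

-- ===== VERDICT (by name: the statement is the Claim_ definition above) =====
theorem lca_max_weight_py_spec : Claim_equal_lca_max_weight_py := by
  intro adj all_ids _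
  unfold Spec_lca_max_weight_py lca_max_weight_py lca_max_weight_py_alt
  have hfold : ∀ (st : St) (root : Int),
      (if st.1.contains root then st else loopA adj st [(root, -1, 0, 0)]) =
        dfsB adj (totalLen adj + 1) st root (-1) 0 0 := by
    intro st root
    by_cases h : st.1.contains root
    · rw [if_pos h]
      have : dfsB adj (totalLen adj + 1) st root (-1) 0 0 = st := by
        simp only [dfsB]
        rw [if_pos h]
      rw [this]
    · rw [if_neg h]
      rw [loopA_eq_fold adj st [(root, -1, 0, 0)]]
      rfl
  rw [show (fun (st : St) (root : Int) =>
      if st.1.contains root then st else loopA adj st [(root, -1, 0, 0)]) =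
      (fun (st : St) (root : Int) => dfsB adj (totalLen adj + 1) st root (-1) 0 0) from
    funext fun st => funext fun root => hfold st root]
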